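-- pv_equiv track=rewrite | github.com/akashahmed1/Missing-Numbers-Using-Python---HackerRank | MissingNumbers.py | missingNumbers
-- ===== SOURCE A (Python) =====
-- import collections
--
-- def CountFrequency(arr):
--     return collections.Counter(arr)
--
-- def missingNumbers(arr, brr):
--
--     freq = CountFrequency(sorted(brr))
--     hashMap = {}
--
--     for key, value in freq.items():
--         hashMap[str(key)] = value;
--
--     for x in (sorted(arr)):
--         if (str(x) in hashMap):
--             hashMap[str(x)] = hashMap[str(x)]-1
--
--             if(hashMap[str(x)] == 0):
--                 del hashMap[str(x)]
--
--     finalList = list(hashMap.keys())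
--     return (finalList)
-- ===== SOURCE B (Python) =====
-- def missingNumbers(arr, brr):
--     a = sorted(arr)
--     b = sorted(brr)
--     res = []
--     i = 0
--     j = 0
--     while j < len(b):
--         v = b[j]
--         k = j + 1
--         while k < len(b) and b[k] == v:
--             k += 1
--         while i < len(a) and a[i] < v:
--             i += 1
--         cnt = 0
--         while i < len(a) and a[i] == v:
--             cnt += 1
--             i += 1
--         if cnt < k - j:
--             res.append(str(v))
--         j = k
--     return res
-- ===== Notes on version B (the rewrite author's own statement) =====
-- stated objective: alternative
-- what changed: Replaces the Counter + string-keyed dict with decrement/delete bookkeeping by a two-pointer merge over the two sorted lists that compares run lengths directly.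
import Mathlib
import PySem

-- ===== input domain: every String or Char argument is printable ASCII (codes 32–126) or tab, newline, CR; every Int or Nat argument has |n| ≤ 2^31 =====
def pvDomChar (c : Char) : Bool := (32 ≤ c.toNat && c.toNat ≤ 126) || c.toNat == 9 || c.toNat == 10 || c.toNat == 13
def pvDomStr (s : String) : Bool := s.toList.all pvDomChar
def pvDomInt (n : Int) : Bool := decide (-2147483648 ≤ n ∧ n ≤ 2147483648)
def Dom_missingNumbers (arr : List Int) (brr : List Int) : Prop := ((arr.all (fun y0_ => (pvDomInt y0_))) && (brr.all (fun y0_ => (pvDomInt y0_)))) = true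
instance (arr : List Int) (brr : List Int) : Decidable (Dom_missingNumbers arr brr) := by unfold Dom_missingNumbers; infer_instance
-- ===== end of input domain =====

-- B replaces A's Counter + string-keyed dict decrement/delete bookkeeping by a
-- two-pointer merge over the two sorted lists (alternative algorithm, same cost).

-- ===== PORT A =====
def countFrequency (l : List Int) : PySem.Dict Int Int := PySem.Dict.counter l

-- body of A's second for-loop (decrement, delete on zero)
def mnStep (h : PySem.Dict String Int) (x : Int) : PySem.Dict String Int :=
  let s := PySem.Int.toStr x
  if h.contains s then
    let h' := h.insert s (h.getD s 0 - 1)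
    if h'.getD s 0 == 0 then h'.erase s else h'
  else h

def missingNumbers (arr : List Int) (brr : List Int) : List String :=
  let freq := countFrequency (PySem.List.sorted brr (fun x => x))
  let hashMap := freq.items.foldl (fun h kv => h.insert (PySem.Int.toStr kv.1) kv.2) PySem.Dict.empty
  let final := (PySem.List.sorted arr (fun x => x)).foldl mnStep hashMap
  final.keys

-- ===== PORT B =====
-- the two-pointer merge of Source B: group the head run of b, advance past smaller
-- elements of a, count equals, emit str(v) iff the b-run is longer
def mnMerge : List Int → List Int → List String
  | _, [] => []
  | a, v :: rest =>
      let cb := 1 + (rest.takeWhile (fun y => y == v)).length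
      let rest' := rest.dropWhile (fun y => y == v)
      let a1 := a.dropWhile (fun y => decide (y < v))
      let ca := (a1.takeWhile (fun y => y == v)).length
      let a2 := a1.dropWhile (fun y => y == v)
      (if ca < cb then [PySem.Int.toStr v] else []) ++ mnMerge a2 rest'
  termination_by _ b => b.length
  decreasing_by
    have := List.length_dropWhile_le (fun y => y == v) rest
    simp only [List.length_cons]; omega

def missingNumbers_alt (arr : List Int) (brr : List Int) : List String :=
  mnMerge (PySem.List.sorted arr (fun x => x)) (PySem.List.sorted brr (fun x => x))

-- ===== PRECONDITION & SPEC =====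
def Spec_missingNumbers (arr : List Int) (brr : List Int) (out : List String) : Prop := out = missingNumbers_alt arr brr
instance (arr : List Int) (brr : List Int) (out : List String) : Decidable (Spec_missingNumbers arr brr out) := by unfold Spec_missingNumbers; infer_instance

-- ===== CLAIM (what is proved, stated in full; the proofs are below) =====
def Claim_equal_missingNumbers : Prop := ∀ (arr : List Int) (brr : List Int), Dom_missingNumbers arr brr → Spec_missingNumbers arr brr (missingNumbers arr brr)

-- ===== LEMMAS AND PROOFS =====

-- str is injective on the integers
theorem pv_digitChar_inj {d e : ℕ} (hd : d < 10) (he : e < 10) (h : Nat.digitChar d = Nat.digitChar e) : d = e := by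
  interval_cases d <;> interval_cases e <;> simp_all [Nat.digitChar]

theorem pv_digitChar_ne_dash {d : ℕ} (hd : d < 10) : Nat.digitChar d ≠ '-' := by
  interval_cases d <;> decide

theorem pv_toDigitsCore_eq (f : ℕ) : ∀ (n : ℕ) (acc : List Char), 0 < n → n < f →
    Nat.toDigitsCore 10 f n acc = ((Nat.digits 10 n).map Nat.digitChar).reverse ++ acc := by
  induction f with
  | zero => intro n acc hn hf; omega
  | succ f ih =>
    intro n acc hn hf
    by_cases h : n / 10 = 0
    · have h10 : n < 10 := by
        rcases (Nat.div_eq_zero_iff).mp h with h' | h'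
        · omega
        · exact h'
      rw [Nat.digits_def' (by norm_num : (1:ℕ) < 10) hn, h]
      simp [Nat.toDigitsCore, h, Nat.mod_eq_of_lt h10]
    · rw [show Nat.toDigitsCore 10 (f+1) n acc
            = Nat.toDigitsCore 10 f (n/10) (Nat.digitChar (n % 10) :: acc) from by
          simp [Nat.toDigitsCore, h]]
      rw [ih (n/10) _ (Nat.pos_of_ne_zero h)
          (by have := Nat.div_lt_self hn (by norm_num : 1 < 10); omega)]
      rw [Nat.digits_def' (by norm_num : (1:ℕ) < 10) hn]
      simp

-- Nat.toDigits 10 n, characterised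
theorem pv_toDigits_eq (n : ℕ) :
    Nat.toDigits 10 n = (if n = 0 then ['0'] else ((Nat.digits 10 n).map Nat.digitChar).reverse) := by
  by_cases hn : n = 0
  · subst hn; simp [Nat.toDigits, Nat.toDigitsCore, Nat.digitChar]
  · rw [if_neg hn]
    have := pv_toDigitsCore_eq (n+1) n [] (Nat.pos_of_ne_zero hn) (by omega)
    simpa [Nat.toDigits] using this

theorem pv_map_digitChar_inj : ∀ (l1 l2 : List ℕ), (∀ x ∈ l1, x < 10) → (∀ x ∈ l2, x < 10) →
    l1.map Nat.digitChar = l2.map Nat.digitChar → l1 = l2 := by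
  intro l1
  induction l1 with
  | nil => intro l2 _ _ h; cases l2 <;> simp_all
  | cons d t ih =>
    intro l2 h1 h2 h
    cases l2 with
    | nil => simp_all
    | cons e t2 =>
      simp only [List.map_cons, List.cons.injEq] at h
      have hd := pv_digitChar_inj (h1 d (by simp)) (h2 e (by simp)) h.1
      have ht := ih t2 (fun x hx => h1 x (by simp [hx])) (fun x hx => h2 x (by simp [hx])) h.2
      rw [hd, ht]

theorem pv_mem_toDigits_ne_dash (n : ℕ) : '-' ∉ Nat.toDigits 10 n := by
  rw [pv_toDigits_eq]
  split_ifs with h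
  · decide
  · intro hmem
    simp only [List.mem_reverse, List.mem_map] at hmem
    obtain ⟨d, hd, heq⟩ := hmem
    exact pv_digitChar_ne_dash (Nat.digits_lt_base (by norm_num) hd) heq

theorem pv_digits_singleton_zero (n : ℕ) (hn : n ≠ 0)
    (h : (Nat.digits 10 n).map Nat.digitChar = ['0']) : False := by
  cases hd : Nat.digits 10 n with
  | nil => exact (Nat.digits_ne_nil_iff_ne_zero.mpr hn) hd
  | cons d t =>
    rw [hd] at h
    simp only [List.map_cons, List.cons.injEq, List.map_eq_nil_iff] at h
    have hdlt : d < 10 := Nat.digits_lt_base (by norm_num) (hd ▸ List.mem_cons_self ..)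
    have hd0 : d = 0 := pv_digitChar_inj hdlt (by norm_num) (by rw [h.1]; rfl)
    have := Nat.ofDigits_digits 10 n
    rw [hd, h.2, hd0] at this
    simp [Nat.ofDigits] at this
    exact hn this.symm

theorem pv_toDigits_inj {m n : ℕ} (h : Nat.toDigits 10 m = Nat.toDigits 10 n) : m = n := by
  rw [pv_toDigits_eq, pv_toDigits_eq] at h
  by_cases hm : m = 0 <;> by_cases hn : n = 0
  · rw [hm, hn]
  · rw [if_pos hm, if_neg hn] at h
    have := congrArg List.reverse h
    simp only [List.reverse_reverse] at this
    exact absurd (pv_digits_singleton_zero n hn (by rw [← this]; decide)) not_false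
  · rw [if_neg hm, if_pos hn] at h
    have := congrArg List.reverse h
    simp only [List.reverse_reverse] at this
    exact absurd (pv_digits_singleton_zero m hm (by rw [this]; decide)) not_false
  · rw [if_neg hm, if_neg hn] at h
    have := congrArg List.reverse h
    simp only [List.reverse_reverse] at this
    have hdig := pv_map_digitChar_inj _ _
      (fun x hx => Nat.digits_lt_base (by norm_num) hx)
      (fun x hx => Nat.digits_lt_base (by norm_num) hx) this
    have h1 := Nat.ofDigits_digits 10 m
    have h2 := Nat.ofDigits_digits 10 n
    rw [hdig] at h1
    rw [h2] at h1
    exact h1.symm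

theorem pv_toStr_inj {m n : Int} (h : PySem.Int.toStr m = PySem.Int.toStr n) : m = n := by
  have h' : PySem.Int.toChars m = PySem.Int.toChars n := by
    have := congrArg String.toList h
    rwa [PySem.Int.toList_toStr, PySem.Int.toList_toStr] at this
  unfold PySem.Int.toChars at h'
  by_cases hm : m < 0 <;> by_cases hn : n < 0 <;> simp only [hm, hn, if_pos, if_false] at h'
  · simp only [List.cons.injEq, true_and] at h'
    have := pv_toDigits_inj h'
    omega
  · exact absurd (h' ▸ List.mem_cons_self ..) (pv_mem_toDigits_ne_dash _)
  · exact absurd (h'.symm ▸ List.mem_cons_self ..) (pv_mem_toDigits_ne_dash _)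
  · have := pv_toDigits_inj h'
    omega

theorem pv_countP_toStr (xs : List Int) (v : Int) :
    xs.countP (fun x => PySem.Int.toStr x == PySem.Int.toStr v) = xs.count v := by
  rw [List.count_eq_countP]
  apply List.countP_congr
  intro x _
  simp only [beq_iff_eq]
  exact ⟨fun h => pv_toStr_inj h, fun h => by rw [h]⟩

-- run/merge facts about sorted lists
theorem pv_dropWhile_head_ge (l : List Int) (v : Int) (hp : l.Pairwise (· ≤ ·))
    (hge : ∀ e ∈ l, v ≤ e) : ∀ e ∈ l.dropWhile (fun y => y == v), v < e := by
  intro e he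
  cases hd : l.dropWhile (fun y => y == v) with
  | nil => rw [hd] at he; simp at he
  | cons h t =>
    have hsub := List.dropWhile_sublist (l := l) (fun y => y == v)
    have hhp : (h == v) = false := by
      have := List.head?_dropWhile_not (fun y => y == v) l
      rw [hd] at this
      simpa using this
    have hhne : h ≠ v := by simpa using hhp
    have hhmem : h ∈ l := hsub.subset (hd ▸ List.mem_cons_self ..)
    have hhv : v < h := lt_of_le_of_ne (hge h hhmem) (Ne.symm hhne)
    have hpd : (h :: t).Pairwise (fun a b => a ≤ b) := hd ▸ List.Pairwise.sublist hsub hp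
    rw [hd] at he
    rcases List.mem_cons.mp he with rfl | ht
    · exact hhv
    · exact lt_of_lt_of_le hhv ((List.pairwise_cons.mp hpd).1 e ht)

theorem pv_takeWhile_count (l : List Int) (v : Int) (hp : l.Pairwise (· ≤ ·))
    (hge : ∀ e ∈ l, v ≤ e) : (l.takeWhile (fun y => y == v)).length = l.count v := by
  conv_rhs => rw [← List.takeWhile_append_dropWhile (p := fun y => y == v) (l := l)]
  rw [List.count_append]
  have h1 : List.count v (l.takeWhile (fun y => y == v)) = (l.takeWhile (fun y => y == v)).length :=
    List.count_eq_length.mpr (fun b hb => by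
      have := List.mem_takeWhile_imp hb; simp at this; omega)
  have h2 : List.count v (l.dropWhile (fun y => y == v)) = 0 :=
    List.count_eq_zero.mpr (fun hmem => lt_irrefl v (pv_dropWhile_head_ge l v hp hge v hmem))
  omega

theorem pv_dropWhile_lt_ge (a : List Int) (v : Int) (hp : a.Pairwise (· ≤ ·)) :
    ∀ e ∈ a.dropWhile (fun y => decide (y < v)), v ≤ e := by
  intro e he
  cases hd : a.dropWhile (fun y => decide (y < v)) with
  | nil => rw [hd] at he; simp at he
  | cons h t =>
    have hsub := List.dropWhile_sublist (l := a) (fun y => decide (y < v))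
    have hhp : (decide (h < v)) = false := by
      have := List.head?_dropWhile_not (fun y => decide (y < v)) a
      rw [hd] at this
      simpa using this
    have hhv : v ≤ h := by simpa using hhp
    have hpd : (h :: t).Pairwise (fun a b => a ≤ b) := hd ▸ List.Pairwise.sublist hsub hp
    rw [hd] at he
    rcases List.mem_cons.mp he with rfl | ht
    · exact hhv
    · exact le_trans hhv ((List.pairwise_cons.mp hpd).1 e ht)

-- Set.ofList of a sorted list beginning with a run of v
theorem pv_discard_run : ∀ (run rest' : List Int) (v : Int), (∀ e ∈ run, e = v) → v ∉ rest' →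
    (PySem.Set.ofList (run ++ rest')).discard v = PySem.Set.ofList rest' := by
  intro run
  induction run with
  | nil =>
    intro rest' v _ hne
    simp only [List.nil_append, PySem.Set.discard]
    apply List.filter_eq_self.mpr
    intro a ha
    have hmem : a ∈ rest' := (PySem.Set.mem_ofList rest' a).mp ha
    simp only [Bool.not_eq_eq_eq_not, Bool.not_true, beq_eq_false_iff_ne, ne_eq]
    intro h
    exact hne (h ▸ hmem)
  | cons e run ih =>
    intro rest' v hrun hne
    have he : e = v := hrun e (by simp)
    subst he
    rw [List.cons_append, PySem.Set.ofList_cons]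
    simp only [PySem.Set.discard] at *
    rw [List.filter_cons_of_neg (by simp), List.filter_filter]
    have : (fun a => ((!a == e) && !a == e : Bool)) = (fun a => (!a == e : Bool)) := by
      funext a; rw [Bool.and_self]
    rw [this]
    exact ih rest' e (fun x hx => hrun x (by simp [hx])) hne

theorem pv_ofList_run (run rest' : List Int) (v : Int) (hrun : ∀ e ∈ run, e = v)
    (hne : v ∉ rest') :
    PySem.Set.ofList (v :: (run ++ rest')) = v :: PySem.Set.ofList rest' := by
  rw [PySem.Set.ofList_cons, pv_discard_run run rest' v hrun hne]

theorem pv_if_shift (s : String) (c : Int) (n : ℕ) :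
    (if c - 1 ≤ (n : Int) then none else some (s, c - 1 - (n : Int)))
      = (if c ≤ ((n + 1 : ℕ) : Int) then (none : Option (String × Int))
         else some (s, c - ((n + 1 : ℕ) : Int))) := by
  by_cases hle : c - 1 ≤ (n : Int)
  · rw [if_pos hle, if_pos (by push_cast; omega)]
  · rw [if_neg hle, if_neg (by push_cast; omega)]
    simp only [Option.some.injEq, Prod.mk.injEq, true_and]
    push_cast
    ring

-- the decrement/delete loop of A, characterised on the items list
theorem pv_foldl_mnStep (xs : List Int) : ∀ (h : PySem.Dict String Int),
    h.keys.Nodup → (∀ p ∈ h.items, 1 ≤ p.2) →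
    (xs.foldl mnStep h).items = h.items.filterMap (fun p =>
      if p.2 ≤ (xs.countP (fun x => PySem.Int.toStr x == p.1) : Int) then none
      else some (p.1, p.2 - (xs.countP (fun x => PySem.Int.toStr x == p.1) : Int))) := by
  induction xs with
  | nil =>
    intro h hnd hvals
    rw [List.foldl_nil]
    have hcong : ∀ p ∈ h.items,
        (if p.2 ≤ (([] : List Int).countP (fun x => PySem.Int.toStr x == p.1) : Int) then none
         else some (p.1, p.2 - (([] : List Int).countP (fun x => PySem.Int.toStr x == p.1) : Int)))
        = some p := by
      intro p hp
      have h1 := hvals p hp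
      simp only [List.countP_nil, Nat.cast_zero, sub_zero]
      rw [if_neg (by omega)]
    rw [List.filterMap_congr hcong, List.filterMap_some]
  | cons x xs ih =>
    intro h hnd hvals
    rw [List.foldl_cons]
    by_cases hc : h.contains (PySem.Int.toStr x)
    · -- the key str(x) is present: decrement it, delete it if it reaches 0
      have hkey : PySem.Int.toStr x ∈ h.keys := (PySem.Dict.contains_iff_mem_keys h _).mp hc
      obtain ⟨p0, hp0, hp0k⟩ := List.mem_map.mp hkey
      have hmem0 : (PySem.Int.toStr x, p0.2) ∈ h.items := by rw [← hp0k]; simpa using hp0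
      have hgd : h.getD (PySem.Int.toStr x) 0 = p0.2 := PySem.Dict.getD_of_mem_items _ hmem0 hnd 0
      have hc0pos : 1 ≤ p0.2 := hvals (PySem.Int.toStr x, p0.2) hmem0
      have huniq : ∀ p ∈ h.items, p.1 = PySem.Int.toStr x → p.2 = p0.2 := by
        intro p hp hpk
        have hmemp : (PySem.Int.toStr x, p.2) ∈ h.items := by rw [← hpk]; simpa using hp
        have := PySem.Dict.getD_of_mem_items _ hmemp hnd 0
        rw [← this, hgd]
      have hstep : mnStep h x = if p0.2 - 1 = 0
          then (h.insert (PySem.Int.toStr x) (p0.2 - 1)).erase (PySem.Int.toStr x)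
          else h.insert (PySem.Int.toStr x) (p0.2 - 1) := by
        simp only [mnStep, hc, if_true, PySem.Dict.getD_insert_self, beq_iff_eq, hgd]
      by_cases hz : p0.2 - 1 = 0
      · -- count reached zero: the key is deleted
        have hitems : (mnStep h x).items = h.items.filter (fun p => !(p.1 == PySem.Int.toStr x)) := by
          rw [hstep, if_pos hz]
          show ((h.insert (PySem.Int.toStr x) (p0.2-1)).items.filter
            (fun p => !(p.1 == PySem.Int.toStr x))) = _
          rw [PySem.Dict.items_insert_of_contains h _ hc, List.filter_map]
          have hpf : ((fun p : String × Int => !(p.1 == PySem.Int.toStr x))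
              ∘ (fun p : String × Int => if (p.1 == PySem.Int.toStr x) = true
                  then (PySem.Int.toStr x, p0.2-1) else p))
              = fun p : String × Int => !(p.1 == PySem.Int.toStr x) := by
            funext q
            by_cases hq : q.1 = PySem.Int.toStr x <;> simp [hq]
          rw [hpf]
          rw [List.map_congr_left (g := id) (fun q hq => by
            have := (List.mem_filter.mp hq).2
            by_cases hq1 : (q.1 == PySem.Int.toStr x) = true
            · rw [hq1] at this; simp at this
            · simp only [hq1, id_eq]
              simp), List.map_id]
        have hnd' : (mnStep h x).keys.Nodup := by
          show (List.map (·.1) (mnStep h x).items).Nodup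
          rw [hitems]
          exact List.Nodup.sublist (List.Sublist.map _ (List.filter_sublist)) hnd
        have hvals' : ∀ p ∈ (mnStep h x).items, 1 ≤ p.2 := by
          intro p hp
          rw [hitems] at hp
          exact hvals p (List.mem_filter.mp hp).1
        rw [ih _ hnd' hvals', hitems, List.filterMap_filter]
        apply List.filterMap_congr
        intro p hp
        by_cases hk : (p.1 == PySem.Int.toStr x) = true
        · have hp1 : p.1 = PySem.Int.toStr x := by simpa using hk
          have hp2 : p.2 = p0.2 := huniq p hp hp1
          simp only [hk, Bool.not_true]
          rw [if_neg (by simp)]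
          rw [List.countP_cons, show (PySem.Int.toStr x == p.1) = true from by simp [hp1]]
          rw [if_pos rfl]
          rw [if_pos (by push_cast; omega)]
        · have hp1 : p.1 ≠ PySem.Int.toStr x := by simpa using hk
          simp only [hk, Bool.not_false]
          simp only [if_true]
          rw [List.countP_cons, show (PySem.Int.toStr x == p.1) = false from by
            rw [beq_eq_false_iff_ne]; exact fun hh => hp1 hh.symm]
          simp
      · -- still positive after the decrement: value updated in place
        have hitems : (mnStep h x).items = h.items.map
            (fun p => if (p.1 == PySem.Int.toStr x) = true then (PySem.Int.toStr x, p0.2-1) else p) := by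
          rw [hstep, if_neg hz]
          exact PySem.Dict.items_insert_of_contains h _ hc
        have hkeys : (mnStep h x).keys = h.keys := by
          show List.map (·.1) (mnStep h x).items = List.map (·.1) h.items
          rw [hitems, List.map_map]
          apply List.map_congr_left
          intro q _
          by_cases hqk : q.1 = PySem.Int.toStr x <;> simp [hqk]
        have hnd' : (mnStep h x).keys.Nodup := by rw [hkeys]; exact hnd
        have hvals' : ∀ p ∈ (mnStep h x).items, 1 ≤ p.2 := by
          intro p hp
          rw [hitems] at hp
          obtain ⟨q, hq, hqe⟩ := List.mem_map.mp hp
          by_cases hqk : (q.1 == PySem.Int.toStr x) = true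
          · rw [if_pos hqk] at hqe
            rw [← hqe]
            show 1 ≤ p0.2 - 1
            omega
          · rw [if_neg hqk] at hqe
            rw [← hqe]
            exact hvals q hq
        rw [ih _ hnd' hvals', hitems, List.filterMap_map]
        apply List.filterMap_congr
        intro p hp
        by_cases hk : (p.1 == PySem.Int.toStr x) = true
        · obtain ⟨pa, pb⟩ := p
          have hp1 : pa = PySem.Int.toStr x := by simpa using hk
          have hp2 : pb = p0.2 := huniq _ hp (by simpa using hk)
          subst hp1
          subst hp2
          simp only [Function.comp_apply]
          rw [if_pos (show ((PySem.Int.toStr x, p0.2).1 == PySem.Int.toStr x) = true from by simp)]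
          rw [List.countP_cons, show (PySem.Int.toStr x == (PySem.Int.toStr x, p0.2).1) = true from by simp]
          rw [if_pos rfl]
          exact pv_if_shift (PySem.Int.toStr x) p0.2 _
        · simp only [Function.comp_apply]
          rw [if_neg hk]
          rw [List.countP_cons, show (PySem.Int.toStr x == p.1) = false from by
            rw [beq_eq_false_iff_ne]
            intro hh
            exact hk (by simp [hh.symm])]
          simp
    · -- key absent: this x changes nothing
      have hstep : mnStep h x = h := by simp [mnStep, hc]
      rw [hstep, ih h hnd hvals]
      apply List.filterMap_congr
      intro p hp
      have hpne : p.1 ≠ PySem.Int.toStr x := by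
        intro he
        exact hc ((PySem.Dict.contains_iff_mem_keys h _).mpr
          (List.mem_map.mpr ⟨p, hp, he⟩))
      have hfalse : (PySem.Int.toStr x == p.1) = false := by
        rw [beq_eq_false_iff_ne]; exact fun hh => hpne hh.symm
      rw [List.countP_cons, hfalse]
      simp

-- A, characterised
theorem pv_A_eq (arr brr : List Int) :
    missingNumbers arr brr = (PySem.Set.ofList (PySem.List.sorted brr (fun x => x))).filterMap
      (fun v => if ((PySem.List.sorted brr (fun x => x)).count v : Int) ≤ ((PySem.List.sorted arr (fun x => x)).count v : Int)
        then none else some (PySem.Int.toStr v)) := by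
  simp only [missingNumbers, countFrequency]
  set sb := PySem.List.sorted brr (fun x => x) with hsb
  set sa := PySem.List.sorted arr (fun x => x) with hsa
  have hfreq := PySem.Dict.items_counter sb
  have hmapNodup :
      (List.map (fun kv : Int × Int => PySem.Int.toStr kv.1) (PySem.Dict.counter sb).items).Nodup := by
    rw [hfreq, List.map_map]
    exact List.Nodup.map (fun a b hab => pv_toStr_inj hab) (PySem.Set.nodup_ofList sb)
  have hHM : (List.foldl (fun h kv => h.insert (PySem.Int.toStr kv.1) kv.2)
        PySem.Dict.empty (PySem.Dict.counter sb).items).items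
      = List.map (fun v => (PySem.Int.toStr v, (List.count v sb : Int))) (PySem.Set.ofList sb) := by
    rw [PySem.Dict.items_foldl_insert_fresh (PySem.Dict.counter sb).items
      (fun kv => PySem.Int.toStr kv.1) (fun kv => kv.2) PySem.Dict.empty
      (fun a _ => PySem.Dict.contains_empty _) hmapNodup]
    rw [hfreq, List.map_map]
    rfl
  have hnd : (List.foldl (fun h kv => h.insert (PySem.Int.toStr kv.1) kv.2)
      PySem.Dict.empty (PySem.Dict.counter sb).items).keys.Nodup := by
    show (List.map (·.1) (List.foldl (fun h kv => h.insert (PySem.Int.toStr kv.1) kv.2)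
      PySem.Dict.empty (PySem.Dict.counter sb).items).items).Nodup
    rw [hHM, List.map_map]
    exact List.Nodup.map (fun a b hab => pv_toStr_inj hab) (PySem.Set.nodup_ofList sb)
  have hvals : ∀ p ∈ (List.foldl (fun h kv => h.insert (PySem.Int.toStr kv.1) kv.2)
      PySem.Dict.empty (PySem.Dict.counter sb).items).items, 1 ≤ p.2 := by
    rw [hHM]
    intro p hp
    obtain ⟨v, hv, rfl⟩ := List.mem_map.mp hp
    show (1:ℤ) ≤ (List.count v sb : ℤ)
    have hvmem : v ∈ sb := (PySem.Set.mem_ofList sb v).mp hv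
    have := List.count_pos_iff.mpr hvmem
    omega
  rw [show (List.foldl mnStep (List.foldl (fun h kv => h.insert (PySem.Int.toStr kv.1) kv.2)
        PySem.Dict.empty (PySem.Dict.counter sb).items) sa).keys
      = List.map (·.1) (List.foldl mnStep (List.foldl (fun h kv => h.insert (PySem.Int.toStr kv.1) kv.2)
        PySem.Dict.empty (PySem.Dict.counter sb).items) sa).items from rfl]
  rw [pv_foldl_mnStep sa _ hnd hvals, hHM, List.map_filterMap, List.filterMap_map]
  apply List.filterMap_congr
  intro v hv
  simp only [Function.comp_apply]
  rw [pv_countP_toStr sa v]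
  by_cases hle : (List.count v sb : ℤ) ≤ (List.count v sa : ℤ)
  · rw [if_pos hle, if_pos hle]; rfl
  · rw [if_neg hle, if_neg hle]; rfl

-- B, characterised
theorem pv_merge_spec (n : ℕ) : ∀ (b a : List Int), b.length ≤ n →
    b.Pairwise (· ≤ ·) → a.Pairwise (· ≤ ·) →
    mnMerge a b = (PySem.Set.ofList b).filterMap
      (fun v => if a.count v < b.count v then some (PySem.Int.toStr v) else none) := by
  induction n with
  | zero =>
    intro b a hlen _ _
    have hb0 : b = [] := List.eq_nil_of_length_eq_zero (Nat.le_zero.mp hlen)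
    subst hb0
    simp [mnMerge]
  | succ n ih =>
    intro b a hlen hb ha
    cases b with
    | nil => simp [mnMerge]
    | cons v rest =>
      obtain ⟨hvr, hrest⟩ := List.pairwise_cons.mp hb
      have hrun_all : ∀ e ∈ rest.takeWhile (fun y => y == v), e = v := fun e he => by
        have := List.mem_takeWhile_imp he; simpa using this
      have hgt_rest' : ∀ e ∈ rest.dropWhile (fun y => y == v), v < e :=
        pv_dropWhile_head_ge rest v hrest hvr
      have hrest'_pw : (rest.dropWhile (fun y => y == v)).Pairwise (· ≤ ·) :=
        List.Pairwise.sublist (List.dropWhile_sublist _) hrest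
      have hvnotin : v ∉ rest.dropWhile (fun y => y == v) :=
        fun hm => lt_irrefl v (hgt_rest' v hm)
      have hofl : PySem.Set.ofList (v :: rest)
          = v :: PySem.Set.ofList (rest.dropWhile (fun y => y == v)) := by
        conv_lhs => rw [← List.takeWhile_append_dropWhile (p := fun y => y == v) (l := rest)]
        exact pv_ofList_run _ _ v hrun_all hvnotin
      have ha1_pw : (a.dropWhile (fun y => decide (y < v))).Pairwise (· ≤ ·) :=
        List.Pairwise.sublist (List.dropWhile_sublist _) ha
      have ha1_ge : ∀ e ∈ a.dropWhile (fun y => decide (y < v)), v ≤ e :=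
        pv_dropWhile_lt_ge a v ha
      have hca : ((a.dropWhile (fun y => decide (y < v))).takeWhile (fun y => y == v)).length
          = (a.dropWhile (fun y => decide (y < v))).count v :=
        pv_takeWhile_count _ v ha1_pw ha1_ge
      have hav : a.count v = (a.dropWhile (fun y => decide (y < v))).count v := by
        conv_lhs => rw [← List.takeWhile_append_dropWhile (p := fun y => decide (y < v)) (l := a)]
        rw [List.count_append]
        have hz : List.count v (a.takeWhile (fun y => decide (y < v))) = 0 :=
          List.count_eq_zero.mpr (fun hm => by
            have := List.mem_takeWhile_imp hm; simp at this)
        omega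
      have ha2_gt : ∀ e ∈ (a.dropWhile (fun y => decide (y < v))).dropWhile (fun y => y == v), v < e :=
        pv_dropWhile_head_ge _ v ha1_pw ha1_ge
      have ha2_pw : ((a.dropWhile (fun y => decide (y < v))).dropWhile (fun y => y == v)).Pairwise (· ≤ ·) :=
        List.Pairwise.sublist (List.dropWhile_sublist _) ha1_pw
      have hcount_a : ∀ u, v < u → a.count u
          = ((a.dropWhile (fun y => decide (y < v))).dropWhile (fun y => y == v)).count u := by
        intro u hu
        conv_lhs => rw [← List.takeWhile_append_dropWhile (p := fun y => decide (y < v)) (l := a)]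
        conv_lhs => rw [← List.takeWhile_append_dropWhile (p := fun y => y == v)
          (l := a.dropWhile (fun y => decide (y < v)))]
        rw [List.count_append, List.count_append]
        have h1 : List.count u (a.takeWhile (fun y => decide (y < v))) = 0 :=
          List.count_eq_zero.mpr (fun hm => by
            have := List.mem_takeWhile_imp hm; simp at this; omega)
        have h2 : List.count u ((a.dropWhile (fun y => decide (y < v))).takeWhile (fun y => y == v)) = 0 :=
          List.count_eq_zero.mpr (fun hm => by
            have := List.mem_takeWhile_imp hm; simp at this; omega)
        omega
      have hcount_b : ∀ u, v < u → (v :: rest).count u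
          = (rest.dropWhile (fun y => y == v)).count u := by
        intro u hu
        rw [List.count_cons_of_ne (by omega)]
        conv_lhs => rw [← List.takeWhile_append_dropWhile (p := fun y => y == v) (l := rest)]
        rw [List.count_append]
        have h1 : List.count u (rest.takeWhile (fun y => y == v)) = 0 :=
          List.count_eq_zero.mpr (fun hm => by
            have := List.mem_takeWhile_imp hm; simp at this; omega)
        omega
      have hbcount : (v :: rest).count v = (rest.takeWhile (fun y => y == v)).length + 1 := by
        rw [List.count_cons_self, pv_takeWhile_count rest v hrest hvr]
      have hacount : a.count v
          = ((a.dropWhile (fun y => decide (y < v))).takeWhile (fun y => y == v)).length :=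
        hav.trans hca.symm
      have hlen' : (rest.dropWhile (fun y => y == v)).length ≤ n := by
        have h1 := List.length_dropWhile_le (fun y => y == v) rest
        simp only [List.length_cons] at hlen
        omega
      have htail := ih (rest.dropWhile (fun y => y == v))
        ((a.dropWhile (fun y => decide (y < v))).dropWhile (fun y => y == v))
        hlen' hrest'_pw ha2_pw
      rw [mnMerge, hofl, List.filterMap_cons]
      by_cases hcmp : ((a.dropWhile (fun y => decide (y < v))).takeWhile (fun y => y == v)).length
          < 1 + (rest.takeWhile (fun y => y == v)).length
      · rw [if_pos hcmp, if_pos (by omega)]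
        simp only [List.singleton_append, List.cons.injEq, true_and]
        rw [htail]
        apply List.filterMap_congr
        intro u hu
        have hu' : u ∈ rest.dropWhile (fun y => y == v) := (PySem.Set.mem_ofList _ _).mp hu
        have hvu := hgt_rest' u hu'
        rw [hcount_a u hvu, hcount_b u hvu]
      · rw [if_neg hcmp, if_neg (by omega)]
        simp only [List.nil_append]
        rw [htail]
        apply List.filterMap_congr
        intro u hu
        have hu' : u ∈ rest.dropWhile (fun y => y == v) := (PySem.Set.mem_ofList _ _).mp hu
        have hvu := hgt_rest' u hu'
        rw [hcount_a u hvu, hcount_b u hvu]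

-- ===== VERDICT (by name: the statement is the Claim_ definition above) =====
theorem missingNumbers_spec : Claim_equal_missingNumbers := by
  intro arr brr _
  unfold Spec_missingNumbers missingNumbers_alt
  rw [pv_A_eq, pv_merge_spec (PySem.List.sorted brr (fun x => x)).length _ _ le_rfl
      (PySem.List.sorted_pairwise brr (fun x => x)) (PySem.List.sorted_pairwise arr (fun x => x))]
  apply List.filterMap_congr
  intro v _
  by_cases h : (PySem.List.sorted arr (fun x => x)).count v < (PySem.List.sorted brr (fun x => x)).count v
  · rw [if_pos h, if_neg (by omega)]
  · rw [if_neg h, if_pos (by omega)]
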